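-- pv_equiv track=rewrite | github.com/mNektar/MultimediaSystems | Python/ZigZagScan_RLE.py | irunLength
-- ===== SOURCE A (Python) =====
-- def irunLength(runSymbols, DCpred):
--     qBlock = [[0 for _ in range(8)] for _ in range(8)]
--     # Decoding DC coefficient
--     DC_diff = runSymbols[0][1]
--     qBlock[0][0] = DC_diff + DCpred
--     # Decoding AC coefficients
--     zigzag = [0] * 64
--     index = 1
--     for run, symbol in runSymbols[1:]:
--         if symbol == 0:  # End of block marker
--             break
--         for _ in range(run):
--             zigzag[index] = 0
--             index += 1
--         zigzag[index] = symbol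
--         index += 1
--     # Convert zigzag sequence back to 8x8 block
--     row, col = 0, 0
--     for i in range(1, 64):
--         if col < 7:
--             col += 1
--         else:
--             row += 1
--             col = 0
--         qBlock[row][col] = zigzag[i]
--     return qBlock
-- ===== SOURCE B (Python) =====
-- def irunLength(runSymbols, DCpred):
--     # Build the flat coefficient sequence by concatenation (no index pointer,
--     # no preallocated arrays), pad it to 64 entries, then slice it into 8 rows.
--     coeffs = [runSymbols[0][1] + DCpred]
--     for run, symbol in runSymbols[1:]:
--         if symbol == 0:
--             break
--         coeffs.extend([0] * run)
--         coeffs.append(symbol)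
--     coeffs.extend([0] * (64 - len(coeffs)))
--     return [coeffs[r * 8:(r + 1) * 8] for r in range(8)]
-- ===== Notes on version B (the rewrite author's own statement) =====
-- stated objective: simpler
-- what changed: B builds the flat coefficient sequence declaratively by list concatenation (extend/append), pads it with zeros to 64 entries and slices it into 8 rows, instead of A's pointer-driven in-place writes into a preallocated 64-array followed by a separate row/col reshape loop.
import Mathlib
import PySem

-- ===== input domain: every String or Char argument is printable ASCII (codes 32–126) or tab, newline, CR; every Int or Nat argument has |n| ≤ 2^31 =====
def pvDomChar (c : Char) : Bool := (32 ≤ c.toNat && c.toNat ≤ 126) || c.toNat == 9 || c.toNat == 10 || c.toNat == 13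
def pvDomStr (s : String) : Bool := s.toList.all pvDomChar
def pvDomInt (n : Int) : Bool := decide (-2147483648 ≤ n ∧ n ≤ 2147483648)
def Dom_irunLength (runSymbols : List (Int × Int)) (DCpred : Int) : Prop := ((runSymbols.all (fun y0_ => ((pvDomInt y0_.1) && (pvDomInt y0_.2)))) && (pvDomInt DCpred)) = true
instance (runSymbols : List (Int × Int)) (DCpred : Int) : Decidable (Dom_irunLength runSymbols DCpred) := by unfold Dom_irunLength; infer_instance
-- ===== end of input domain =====

-- B builds the flat coefficient sequence by list concatenation, pads it to 64 and
-- slices it into 8 rows, replacing A's pointer-driven in-place array writes and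
-- separate reshape loop (objective: simpler).

-- qBlock[r][c] = v  (in range under Pre_)
def pvSet2d (q : List (List Int)) (r c : Nat) (v : Int) : List (List Int) :=
  q.set r ((q.getD r []).set c v)

-- ===== PORT A =====
-- 'for _ in range(run): zigzag[index] = 0; index += 1'
def pvWriteZeros : List Int → Nat → Nat → List Int
  | z, _, 0 => z
  | z, i, n + 1 => pvWriteZeros (z.set i 0) (i + 1) n

-- the AC loop of A (state: zigzag, index); 'break' on symbol == 0
def pvAcLoop : List (Int × Int) → List Int → Nat → List Int
  | [], z, _ => z
  | (run, symbol) :: rest, z, index =>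
    if symbol = 0 then z
    else
      let z' := pvWriteZeros z index run.toNat   -- range(run) is empty for run ≤ 0
      let i' := index + run.toNat
      pvAcLoop rest (z'.set i' symbol) (i' + 1)

-- one step of A's reshape loop (state: qBlock, row, col)
def pvReshapeStep (z : List Int) (st : List (List Int) × Nat × Nat) (i : Nat) :
    List (List Int) × Nat × Nat :=
  let (q, row, col) := st
  let rc := if col < 7 then (row, col + 1) else (row + 1, 0)
  (pvSet2d q rc.1 rc.2 (z.getD i 0), rc.1, rc.2)

def irunLength (runSymbols : List (Int × Int)) (DCpred : Int) : List (List Int) :=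
  let qBlock := List.replicate 8 (List.replicate 8 (0 : Int))
  -- runSymbols[0][1]: IndexError on [] is excluded by Pre_
  let DC_diff := (runSymbols.getD 0 (0, 0)).2
  let qBlock := pvSet2d qBlock 0 0 (DC_diff + DCpred)
  let zigzag := pvAcLoop (runSymbols.drop 1) (List.replicate 64 0) 1
  ((List.range' 1 63).foldl (pvReshapeStep zigzag) (qBlock, 0, 0)).1

-- ===== PORT B =====
-- the building loop of B: coeffs.extend([0]*run); coeffs.append(symbol); break on 0
def pvBuild : List (Int × Int) → List Int → List Int
  | [], c => c
  | (run, symbol) :: rest, c =>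
    if symbol = 0 then c
    else pvBuild rest ((c ++ List.replicate run.toNat 0) ++ [symbol])

def irunLength_alt (runSymbols : List (Int × Int)) (DCpred : Int) : List (List Int) :=
  let coeffs := pvBuild (runSymbols.drop 1) [(runSymbols.getD 0 (0, 0)).2 + DCpred]
  -- coeffs.extend([0] * (64 - len(coeffs))): empty for len ≥ 64, as Nat subtraction
  let coeffs := coeffs ++ List.replicate (64 - coeffs.length) (0 : Int)
  -- [coeffs[r*8:(r+1)*8] for r in range(8)]
  (List.range 8).map (fun (r : Nat) =>
    PySem.List.slice coeffs (some ((r : Int) * 8)) (some (((r : Int) + 1) * 8)))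

-- ===== PRECONDITION & SPEC =====
-- total number of zigzag cells the AC loop writes (stops at the end-of-block marker)
def pvCost : List (Int × Int) → Nat
  | [] => 0
  | (run, sym) :: rest => if sym = 0 then 0 else run.toNat + 1 + pvCost rest

-- A raises IndexError on the empty list (runSymbols[0]) and when the decoded
-- coefficients overflow position 63 of the block (zigzag[index] with index ≥ 64);
-- Pre_ excludes exactly those inputs.
def Pre_irunLength (runSymbols : List (Int × Int)) (DCpred : Int) : Prop :=
  runSymbols ≠ [] ∧ 1 + pvCost (runSymbols.drop 1) ≤ 64

instance (runSymbols : List (Int × Int)) (DCpred : Int) : Decidable (Pre_irunLength runSymbols DCpred) := by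
  unfold Pre_irunLength; infer_instance

def pvWitness_irunLength : (List (Int × Int)) × Int := ([(0, 5), (2, 3), (0, 0)], 10)

def Spec_irunLength (runSymbols : List (Int × Int)) (DCpred : Int) (out : List (List Int)) : Prop := out = irunLength_alt runSymbols DCpred
instance (runSymbols : List (Int × Int)) (DCpred : Int) (out : List (List Int)) : Decidable (Spec_irunLength runSymbols DCpred out) := by unfold Spec_irunLength; infer_instance

-- ===== CLAIM (what is proved, stated in full; the proofs are below) =====
def Claim_equal_irunLength : Prop := ∀ (runSymbols : List (Int × Int)) (DCpred : Int), Dom_irunLength runSymbols DCpred → Pre_irunLength runSymbols DCpred → Spec_irunLength runSymbols DCpred (irunLength runSymbols DCpred)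

-- ===== LEMMAS AND PROOFS =====

-- proof-side abbreviation: slice a flat 64-list into 8 rows of 8
def pvChunk8 (l : List Int) : List (List Int) :=
  (List.range 8).map (fun r => (l.drop (r * 8)).take 8)

theorem pvAlt_eq_chunk (runSymbols : List (Int × Int)) (DCpred : Int) :
    irunLength_alt runSymbols DCpred =
      pvChunk8 (pvBuild (runSymbols.drop 1) [(runSymbols.getD 0 (0, 0)).2 + DCpred]
        ++ List.replicate (64 - (pvBuild (runSymbols.drop 1) [(runSymbols.getD 0 (0, 0)).2 + DCpred]).length) 0) := by
  unfold irunLength_alt pvChunk8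
  apply List.map_congr_left
  intro r _
  rw [show ((r : Int) + 1) * 8 = ((r : Int) * 8) + (8 : Nat) from by push_cast; ring,
      show ((r : Int) * 8) = ((r * 8 : Nat) : Int) from by push_cast; ring]
  exact PySem.List.slice_natCast_add _ _ _

theorem pvChunk8_get (l : List Int) (j : Nat) (hj : j < 8) :
    (pvChunk8 l).getD j [] = (l.drop (j * 8)).take 8 := by
  simp [pvChunk8, List.getD, hj]

theorem pvChunk8_set (l : List Int) (hl : l.length = 64) (i : Nat) (hi : i < 64) (v : Int) :
    pvChunk8 (l.set i v) = pvSet2d (pvChunk8 l) (i / 8) (i % 8) v := by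
  have h8 : i / 8 < 8 := by omega
  unfold pvSet2d
  rw [pvChunk8_get l (i / 8) h8]
  apply List.ext_getElem
  · simp [pvChunk8]
  · intro j h1 h2
    have hj : j < 8 := by simpa [pvChunk8] using h1
    simp only [pvChunk8, List.getElem_map, List.getElem_range]
    by_cases hji : i / 8 = j
    · subst hji
      rw [List.getElem_set_self]
      apply List.ext_getElem
      · simp [hl]
      · intro k hk1 hk2
        have hk : k < 8 := by
          simp only [List.length_take, List.length_drop, List.length_set, hl] at hk1; omega
        rw [List.getElem_take, List.getElem_drop, List.getElem_set, List.getElem_set]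
        by_cases hik : i % 8 = k
        · rw [if_pos (by omega), if_pos hik]
        · rw [if_neg (by omega), if_neg hik, List.getElem_take, List.getElem_drop]
    · rw [List.getElem_set_ne hji]
      simp only [List.getElem_map, List.getElem_range]
      apply List.ext_getElem
      · simp [hl]
      · intro k hk1 hk2
        have hk : k < 8 := by
          simp only [List.length_take, List.length_drop, List.length_set, hl] at hk1; omega
        rw [List.getElem_take, List.getElem_drop, List.getElem_set,
            if_neg (by omega), List.getElem_take, List.getElem_drop]

-- lift the elementwise set2d fold through pvChunk8
theorem pvFoldl_chunk (idxs : List Nat) (z : List Int) :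
    ∀ (w : List Int), w.length = 64 → (∀ i ∈ idxs, i < 64) →
    idxs.foldl (fun q i => pvSet2d q (i / 8) (i % 8) (z.getD i 0)) (pvChunk8 w)
      = pvChunk8 (idxs.foldl (fun w i => w.set i (z.getD i 0)) w) := by
  induction idxs with
  | nil => intro w _ _; rfl
  | cons i rest ih =>
    intro w hw hall
    simp only [List.foldl_cons]
    rw [← pvChunk8_set w hw i (hall i (List.mem_cons_self ..)) (z.getD i 0)]
    exact ih _ (by simp [hw]) (fun j hj => hall j (List.mem_cons_of_mem _ hj))

-- the fold that copies z into w, characterised pointwise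
theorem pvFoldl_set_get (idxs : List Nat) (z : List Int) :
    ∀ (w : List Int) (j : Nat),
    (idxs.foldl (fun w i => w.set i (z.getD i 0)) w)[j]?
      = if j ∈ idxs ∧ j < w.length then some (z.getD j 0) else w[j]? := by
  induction idxs with
  | nil => intro w j; simp
  | cons i rest ih =>
    intro w j
    simp only [List.foldl_cons]
    rw [ih]
    simp only [List.length_set, List.mem_cons]
    by_cases hlen : j < w.length
    · by_cases hr : j ∈ rest
      · simp [hr, hlen]
      · simp only [hr, false_and, if_false, or_false]
        by_cases hij : j = i
        · subst hij
          simp [hlen]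
        · rw [List.getElem?_set_ne (by omega), if_neg (by tauto)]
    · simp [hlen]
theorem pvLength_writeZeros (z : List Int) (i n : Nat) :
    (pvWriteZeros z i n).length = z.length := by
  induction n generalizing z i with
  | zero => rfl
  | succ n ih => simp [pvWriteZeros, ih, List.length_set]

theorem pvLength_acLoop (rest : List (Int × Int)) :
    ∀ (z : List Int) (i : Nat), (pvAcLoop rest z i).length = z.length := by
  induction rest with
  | nil => intro z i; rfl
  | cons p rest ih =>
    obtain ⟨run, sym⟩ := p
    intro z i
    simp only [pvAcLoop]
    split
    · rfl
    · rw [ih]; simp [pvLength_writeZeros]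

-- pvAcLoop never touches position 0 (index stays ≥ 1)
theorem pvWriteZeros_set0 (n : Nat) : ∀ (z : List Int) (i : Nat) (v : Int), 1 ≤ i →
    (pvWriteZeros z i n).set 0 v = pvWriteZeros (z.set 0 v) i n := by
  induction n with
  | zero => intro z i v _; rfl
  | succ n ih =>
    intro z i v hi
    simp only [pvWriteZeros]
    rw [ih _ _ _ (by omega), List.set_comm _ _ (by omega)]

theorem pvAcLoop_set0 (rest : List (Int × Int)) :
    ∀ (z : List Int) (i : Nat) (v : Int), 1 ≤ i →
    (pvAcLoop rest z i).set 0 v = pvAcLoop rest (z.set 0 v) i := by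
  induction rest with
  | nil => intro z i v _; rfl
  | cons p rest ih =>
    obtain ⟨run, sym⟩ := p
    intro z i v hi
    simp only [pvAcLoop]
    split
    · rfl
    · rw [ih _ _ _ (by omega), List.set_comm _ _ (by omega), pvWriteZeros_set0 _ _ _ _ hi]

-- writing zeros into the zero padding is the identity
theorem pvWriteZeros_id (n : Nat) : ∀ (pref : List Int) (k : Nat), n ≤ k →
    pvWriteZeros (pref ++ List.replicate k 0) pref.length n = pref ++ List.replicate k 0 := by
  induction n with
  | zero => intro pref k _; rfl
  | succ n ih =>
    intro pref k h
    obtain ⟨k', rfl⟩ : ∃ k', k = k' + 1 := ⟨k - 1, by omega⟩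
    simp only [pvWriteZeros]
    have hset : (pref ++ List.replicate (k' + 1) (0:Int)).set pref.length 0
        = pref ++ List.replicate (k' + 1) 0 := by
      rw [List.set_append_right _ _ (le_refl _)]
      simp [List.replicate_succ]
    rw [hset]
    have : pref ++ List.replicate (k' + 1) (0:Int) = (pref ++ [0]) ++ List.replicate k' 0 := by
      simp [List.replicate_succ]
    rw [this, show pref.length + 1 = (pref ++ [0]).length from by simp]
    exact ih _ _ (by omega)

-- setting inside the zero padding
theorem pvReplicate_set (m : Nat) : ∀ (k : Nat) (v : Int), m < k →
    (List.replicate k (0 : Int)).set m v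
      = List.replicate m 0 ++ v :: List.replicate (k - m - 1) 0 := by
  induction m with
  | zero =>
    intro k v h
    obtain ⟨k', rfl⟩ : ∃ k', k = k' + 1 := ⟨k - 1, by omega⟩
    simp [List.replicate_succ]
  | succ m ih =>
    intro k v h
    obtain ⟨k', rfl⟩ : ∃ k', k = k' + 1 := ⟨k - 1, by omega⟩
    simp only [List.replicate_succ, List.set_cons_succ, List.cons_append]
    rw [ih k' v (by omega), show k' + 1 - (m + 1) - 1 = k' - m - 1 from by omega]

theorem pvSet_pad (pref : List Int) (k m : Nat) (v : Int) (h : m < k) :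
    (pref ++ List.replicate k (0 : Int)).set (pref.length + m) v
      = ((pref ++ List.replicate m 0) ++ [v]) ++ List.replicate (k - m - 1) 0 := by
  rw [List.set_append_right _ _ (by omega), show pref.length + m - pref.length = m from by omega,
      pvReplicate_set m k v h]
  simp

-- A's AC loop on a prefix-plus-zero-padding list equals B's concatenation build, padded
theorem pvAcLoop_build (rest : List (Int × Int)) :
    ∀ (pref : List Int), pref.length + pvCost rest ≤ 64 →
    pvAcLoop rest (pref ++ List.replicate (64 - pref.length) 0) pref.length
      = pvBuild rest pref ++ List.replicate (64 - (pvBuild rest pref).length) 0 := by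
  induction rest with
  | nil => intro pref _; rfl
  | cons p rest ih =>
    obtain ⟨run, sym⟩ := p
    intro pref hcost
    simp only [pvAcLoop, pvBuild]
    by_cases hs : sym = 0
    · simp [hs]
    · simp only [if_neg hs]
      have hc : pvCost ((run, sym) :: rest) = run.toNat + 1 + pvCost rest := by simp [pvCost, hs]
      rw [hc] at hcost
      rw [pvWriteZeros_id _ _ _ (by omega),
          pvSet_pad pref (64 - pref.length) run.toNat sym (by omega)]
      have hlen : ((pref ++ List.replicate run.toNat 0) ++ [sym]).length
          = pref.length + run.toNat + 1 := by simp; omega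
      rw [show 64 - pref.length - run.toNat - 1
            = 64 - ((pref ++ List.replicate run.toNat 0) ++ [sym]).length from by
          rw [hlen]; omega,
          show pref.length + run.toNat + 1
            = ((pref ++ List.replicate run.toNat 0) ++ [sym]).length from by rw [hlen]; try omega]
      exact ih _ (by rw [hlen]; omega)

-- A's reshape loop tracking (row, col) equals the abstract (i/8, i%8) writes
theorem pvReshape_eq (n : Nat) : ∀ (s : Nat) (z : List Int) (q : List (List Int)) (row col : Nat),
    s = 8 * row + col + 1 → col < 8 →
    ((List.range' s n).foldl (pvReshapeStep z) (q, row, col)).1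
      = (List.range' s n).foldl (fun q i => pvSet2d q (i / 8) (i % 8) (z.getD i 0)) q := by
  induction n with
  | zero => intro s z q row col _ _; rfl
  | succ n ih =>
    intro s z q row col hs hc
    rw [List.range'_succ]
    simp only [List.foldl_cons, pvReshapeStep]
    by_cases h7 : col < 7
    · simp only [if_pos h7]
      rw [show s / 8 = row from by omega, show s % 8 = col + 1 from by omega]
      exact ih (s + 1) z _ row (col + 1) (by omega) (by omega)
    · simp only [if_neg h7]
      rw [show s / 8 = row + 1 from by omega, show s % 8 = 0 from by omega]
      exact ih (s + 1) z _ (row + 1) 0 (by omega) (by omega)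

-- ===== VERDICT (by name: the statement is the Claim_ definition above) =====
-- the copy fold over positions 1..63 rebuilds the zigzag list (position 0 kept)
theorem pvCopy_eq (z : List Int) (hz : z.length = 64) (v : Int) :
    (List.range' 1 63).foldl (fun w i => w.set i (z.getD i 0))
        ((List.replicate 64 (0 : Int)).set 0 v)
      = z.set 0 v := by
  apply List.ext_getElem?
  intro j
  rw [pvFoldl_set_get]
  by_cases h0 : j = 0
  · subst h0
    rw [if_neg (by simp [List.mem_range'_1])]
    simp [hz]
  · by_cases hj : j < 64
    · rw [if_pos ⟨List.mem_range'_1.mpr ⟨by omega, by omega⟩, by simp; omega⟩,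
          List.getElem?_set_ne (by omega)]
      have hjz : z[j]? = some z[j] := List.getElem?_eq_getElem (by omega)
      simp [List.getD, hjz]
    · rw [if_neg (by simp [List.mem_range'_1]; omega)]
      rw [List.getElem?_eq_none (by simp; omega), List.getElem?_eq_none (by simp [hz]; omega)]

-- ===== VERDICT (by name: the statement is the Claim_ definition above) =====
theorem irunLength_spec : Claim_equal_irunLength := by
  intro runSymbols DCpred _ hpre
  obtain ⟨hne, hbound⟩ := hpre
  obtain ⟨⟨r0, s0⟩, tail, rfl⟩ : ∃ p t, runSymbols = p :: t := by
    cases runSymbols with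
    | nil => exact absurd rfl hne
    | cons p t => exact ⟨p, t, rfl⟩
  unfold Spec_irunLength irunLength
  simp only [List.getD, List.getElem?_cons_zero, Option.getD_some, List.drop_succ_cons,
    List.drop_zero]
  rw [pvAlt_eq_chunk]
  simp only [List.getD, List.getElem?_cons_zero, Option.getD_some, List.drop_succ_cons,
    List.drop_zero]
  set dcv := s0 + DCpred with hdcv
  set z := pvAcLoop tail (List.replicate 64 0) 1 with hzdef
  have hz64 : z.length = 64 := by rw [hzdef, pvLength_acLoop]; simp
  have hq0 : pvSet2d (List.replicate 8 (List.replicate 8 (0 : Int))) 0 0 dcv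
      = pvChunk8 ((List.replicate 64 (0 : Int)).set 0 dcv) := by rfl
  rw [pvReshape_eq 63 1 z _ 0 0 rfl (by omega), hq0,
      pvFoldl_chunk _ z _ (by simp)
        (fun i hi => by have := List.mem_range'_1.mp hi; omega),
      pvCopy_eq z hz64 dcv, hzdef, pvAcLoop_set0 tail _ _ _ (le_refl 1),
      show ((List.replicate 64 (0 : Int)).set 0 dcv) = [dcv] ++ List.replicate (64 - ([dcv] : List Int).length) 0 from rfl,
      show (1 : Nat) = ([dcv] : List Int).length from rfl,
      pvAcLoop_build tail [dcv] (by simpa using hbound)]
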